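-- pv_equiv track=rewrite | github.com/annyman/timetable | app.py | calculate_pomodoro_segments
-- ===== SOURCE A (Python) =====
-- from typing import List, Dict, Optional, Tuple
--
-- POMODORO_WORK = 25
--
-- POMODORO_SHORT_BREAK = 5
--
-- POMODORO_LONG_BREAK = 15
--
-- POMODOROS_BEFORE_LONG_BREAK = 4
--
-- def calculate_pomodoro_segments(total_work_minutes: int) -> List[Tuple[int, int]]:
--     segments = []
--     remaining = total_work_minutes
--     pomodoro_count = 0
--     while remaining > 0:
--         work_time = min(POMODORO_WORK, remaining)
--         remaining -= work_time
--         if remaining > 0: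
--             pomodoro_count += 1
--             break_time = (POMODORO_LONG_BREAK if pomodoro_count % POMODOROS_BEFORE_LONG_BREAK == 0 else POMODORO_SHORT_BREAK)
--         else:
--             break_time = 0
--         segments.append((work_time, break_time))
--     return segments
-- ===== SOURCE B (Python) =====
-- from typing import List, Tuple
--
-- POMODORO_WORK = 25
-- POMODORO_SHORT_BREAK = 5
-- POMODORO_LONG_BREAK = 15
-- POMODOROS_BEFORE_LONG_BREAK = 4
--
-- def calculate_pomodoro_segments(total_work_minutes: int) -> List[Tuple[int, int]]:
--     if total_work_minutes <= 0:
--         return []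
--     full, rem = divmod(total_work_minutes, POMODORO_WORK)
--     sizes = [POMODORO_WORK] * full + ([rem] if rem != 0 else [])
--     n = len(sizes)
--     segments = []
--     for i, work in enumerate(sizes):
--         if i == n - 1:
--             brk = 0
--         elif (i + 1) % POMODOROS_BEFORE_LONG_BREAK == 0:
--             brk = POMODORO_LONG_BREAK
--         else:
--             brk = POMODORO_SHORT_BREAK
--         segments.append((work, brk))
--     return segments
-- ===== Notes on version B (the rewrite author's own statement) =====
-- stated objective: alternative
-- what changed: Replaces the while loop with mutable remaining/pomodoro_count state by an up-front divmod that precomputes the list of chunk sizes via bulk list multiplication, then a single enumerate pass deriving each break from the index: zero on the last chunk, a long break on every fourth chunk, otherwise a short break.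
import Mathlib
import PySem

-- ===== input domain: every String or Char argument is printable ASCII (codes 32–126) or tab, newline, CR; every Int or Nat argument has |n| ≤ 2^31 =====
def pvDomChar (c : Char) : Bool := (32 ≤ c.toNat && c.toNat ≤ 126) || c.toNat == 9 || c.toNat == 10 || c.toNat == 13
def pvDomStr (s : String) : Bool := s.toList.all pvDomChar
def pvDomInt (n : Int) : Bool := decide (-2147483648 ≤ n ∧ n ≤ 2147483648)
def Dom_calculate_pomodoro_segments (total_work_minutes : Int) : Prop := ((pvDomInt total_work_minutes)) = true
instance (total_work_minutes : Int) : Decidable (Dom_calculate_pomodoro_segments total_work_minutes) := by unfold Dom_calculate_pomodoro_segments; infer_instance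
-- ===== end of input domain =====

-- B replaces A's mutable while-loop state by an up-front divmod into chunk sizes plus an
-- index-driven enumerate pass (alternative decomposition, same cost); proved equal on all ints.

-- ===== PORT A =====
-- the while loop: state = (remaining, pomodoro_count); segments built by appends = cons on return
def pomLoop (remaining : Int) (pomodoro_count : Int) : List (Int × Int) :=
  if _h : remaining > 0 then
    let work_time := min 25 remaining
    let remaining' := remaining - work_time
    if remaining' > 0 then
      (work_time, if PySem.Int.mod (pomodoro_count + 1) 4 = 0 then (15 : Int) else 5)
        :: pomLoop remaining' (pomodoro_count + 1)
    else
      [(work_time, (0 : Int))]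
  else []
termination_by remaining.toNat
decreasing_by omega

def calculate_pomodoro_segments (total_work_minutes : Int) : List (Int × Int) :=
  pomLoop total_work_minutes 0

-- ===== PORT B =====
def calculate_pomodoro_segments_alt (total_work_minutes : Int) : List (Int × Int) :=
  if total_work_minutes ≤ 0 then [] else
  let full := PySem.Int.floordiv total_work_minutes 25
  let rem := PySem.Int.mod total_work_minutes 25
  let sizes := PySem.List.pyRepeat [(25 : Int)] full ++ (if rem ≠ 0 then [rem] else [])
  let n : Int := sizes.length
  (PySem.List.enumerate sizes 0).foldl
    (fun segments iw =>
      segments ++ [(iw.2,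
        if iw.1 = n - 1 then (0 : Int)
        else if PySem.Int.mod (iw.1 + 1) 4 = 0 then 15 else 5)]) []

-- ===== PRECONDITION & SPEC =====
def Spec_calculate_pomodoro_segments (total_work_minutes : Int) (out : List (Int × Int)) : Prop := out = calculate_pomodoro_segments_alt total_work_minutes
instance (total_work_minutes : Int) (out : List (Int × Int)) : Decidable (Spec_calculate_pomodoro_segments total_work_minutes out) := by unfold Spec_calculate_pomodoro_segments; infer_instance

-- ===== CLAIM (what is proved, stated in full; the proofs are below) =====
def Claim_equal_calculate_pomodoro_segments : Prop := ∀ (total_work_minutes : Int), Dom_calculate_pomodoro_segments total_work_minutes → Spec_calculate_pomodoro_segments total_work_minutes (calculate_pomodoro_segments total_work_minutes)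

-- ===== LEMMAS AND PROOFS =====

-- proof-side normal form: the list of chunk sizes of t
def chunks (r : Int) : List Int :=
  if r ≤ 0 then [] else if r ≤ 25 then [r] else 25 :: chunks (r - 25)
termination_by r.toNat
decreasing_by omega

-- proof-side normal form of the break assignment: count c before the chunk, 0 on the last
def mark : List Int → Int → List (Int × Int)
  | [], _ => []
  | [w], _ => [(w, 0)]
  | w :: w2 :: ws, c =>
      (w, if PySem.Int.mod (c + 1) 4 = 0 then 15 else 5) :: mark (w2 :: ws) (c + 1)

lemma chunks_ne_nil {r : Int} (h : 0 < r) : chunks r ≠ [] := by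
  unfold chunks
  split_ifs <;> simp_all <;> omega

lemma mark_cons {w : Int} {ws : List Int} (h : ws ≠ []) (c : Int) :
    mark (w :: ws) c =
      (w, if PySem.Int.mod (c + 1) 4 = 0 then 15 else 5) :: mark ws (c + 1) := by
  cases ws with
  | nil => exact absurd rfl h
  | cons w2 ws => rfl

lemma pomLoop_eq_mark (r c : Int) : pomLoop r c = mark (chunks r) c := by
  by_cases h0 : r ≤ 0
  · rw [pomLoop, chunks]
    simp [h0, mark, show ¬ r > 0 by omega]
  · by_cases h25 : r ≤ 25
    · rw [pomLoop, chunks]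
      have hm : min (25 : Int) r = r := by omega
      rw [dif_pos (show r > 0 by omega), if_neg h0, if_pos h25]
      simp [hm, mark]
    · rw [pomLoop, chunks]
      have hm : min (25 : Int) r = 25 := by omega
      rw [dif_pos (show r > 0 by omega), if_neg h0, if_neg h25]
      simp only [hm]
      rw [if_pos (show r - 25 > 0 by omega),
        mark_cons (chunks_ne_nil (show (0:Int) < r - 25 by omega)) c,
        pomLoop_eq_mark (r - 25) (c + 1)]
termination_by r.toNat
decreasing_by omega

lemma sizes_eq_chunks (t : Int) (ht : 0 < t) :
    PySem.List.pyRepeat [(25 : Int)] (PySem.Int.floordiv t 25)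
        ++ (if PySem.Int.mod t 25 ≠ 0 then [PySem.Int.mod t 25] else [])
      = chunks t := by
  rw [PySem.Int.floordiv_eq_ediv_of_pos (by norm_num),
      PySem.Int.mod_eq_emod_of_pos (by norm_num),
      PySem.List.pyRepeat_singleton]
  by_cases h25 : t ≤ 25
  · rw [chunks, if_neg (show ¬ t ≤ 0 by omega), if_pos h25]
    by_cases heq : t = 25
    · subst heq; norm_num
    · have hd : t / 25 = 0 := by omega
      have hm : t % 25 = t := by omega
      rw [hd, hm, if_pos (show t ≠ 0 by omega)]
      simp
  · rw [chunks, if_neg (show ¬ t ≤ 0 by omega), if_neg h25]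
    have ih := sizes_eq_chunks (t - 25) (by omega)
    rw [PySem.Int.floordiv_eq_ediv_of_pos (by norm_num),
        PySem.Int.mod_eq_emod_of_pos (by norm_num),
        PySem.List.pyRepeat_singleton] at ih
    have hd : (t / 25).toNat = ((t - 25) / 25).toNat + 1 := by omega
    have hm : t % 25 = (t - 25) % 25 := by omega
    rw [hd, hm, List.replicate_succ, List.cons_append, ih]
termination_by t.toNat
decreasing_by omega

lemma foldl_enum_eq_mark (ws : List Int) :
    ∀ (s n : Int) (init : List (Int × Int)), n = s + ws.length →
    (PySem.List.enumerate ws s).foldl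
      (fun segments iw =>
        segments ++ [(iw.2,
          if iw.1 = n - 1 then (0 : Int)
          else if PySem.Int.mod (iw.1 + 1) 4 = 0 then 15 else 5)]) init
    = init ++ mark ws s := by
  induction ws with
  | nil => intro s n init _; simp [PySem.List.enumerate_nil, mark]
  | cons w ws ih =>
    intro s n init hn
    rw [PySem.List.enumerate_cons, List.foldl_cons]
    cases ws with
    | nil =>
      have : s = n - 1 := by simp at hn; omega
      simp [PySem.List.enumerate_nil, mark, this]
    | cons w2 ws2 =>
      have hne : s ≠ n - 1 := by
        simp [List.length_cons] at hn; omega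
      rw [ih (s + 1) n _ (by simp at hn ⊢; omega),
          mark_cons (by simp) s]
      simp [hne, List.append_assoc]

-- ===== VERDICT (by name: the statement is the Claim_ definition above) =====
theorem calculate_pomodoro_segments_spec : Claim_equal_calculate_pomodoro_segments := by
  intro t _
  unfold Spec_calculate_pomodoro_segments calculate_pomodoro_segments calculate_pomodoro_segments_alt
  by_cases h0 : t ≤ 0
  · rw [if_pos h0, pomLoop]
    simp [show ¬ t > 0 by omega]
  · rw [if_neg h0]
    simp only []
    rw [foldl_enum_eq_mark _ 0 _ [] (by simp),
        sizes_eq_chunks t (show (0:Int) < t by omega), List.nil_append,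
        pomLoop_eq_mark]
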